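-- pv_equiv track=rewrite | github.com/githubLINGESH/Readmission-Dashboard | backend/flask/backend.py | parse_bulleted_list
-- ===== SOURCE A (Python) =====
-- from typing import Dict, Any, List, Union
-- from typing import Dict, Any, List, Union
--
-- def parse_bulleted_list(lines: List[str]) -> Dict[str, Any]:
--     result = {}
--     current_item = None
--     current_content = []
--
--     for line in lines:
--         line = line.strip()
--         if line.startswith('*'):
--             if current_item:
--                 result[current_item] = ' '.join(current_content)
--             current_item = line[1:].strip()
--             current_content = []
--         elif current_item:
--             current_content.append(line)
--
--     # Add the last item
--     if current_item:
--         result[current_item] = ' '.join(current_content)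
--
--     return result
-- ===== SOURCE B (Python) =====
-- def parse_bulleted_list(lines):
--     # Chunking re-implementation: strip once, then for each bullet take the
--     # contiguous block of lines up to the next bullet as its content.
--     stripped = [ln.strip() for ln in lines]
--     result = {}
--     i = 0
--     n = len(stripped)
--     while i < n:
--         s = stripped[i]
--         if s.startswith('*'):
--             key = s[1:].strip()
--             j = i + 1
--             while j < n and not stripped[j].startswith('*'):
--                 j += 1
--             if key:
--                 result[key] = ' '.join(stripped[i + 1:j])
--             i = j
--         else:
--             i += 1
--     return result
-- ===== Notes on version B (the rewrite author's own statement) =====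
-- stated objective: alternative
-- what changed: Replaces A's single pass with pending-item/accumulator state (current_item, current_content, flush-on-next-bullet) by a chunking scan: strip all lines once, then at each bullet take the contiguous block up to the next bullet as its content and assign it immediately, skipping empty keys.
import Mathlib
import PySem

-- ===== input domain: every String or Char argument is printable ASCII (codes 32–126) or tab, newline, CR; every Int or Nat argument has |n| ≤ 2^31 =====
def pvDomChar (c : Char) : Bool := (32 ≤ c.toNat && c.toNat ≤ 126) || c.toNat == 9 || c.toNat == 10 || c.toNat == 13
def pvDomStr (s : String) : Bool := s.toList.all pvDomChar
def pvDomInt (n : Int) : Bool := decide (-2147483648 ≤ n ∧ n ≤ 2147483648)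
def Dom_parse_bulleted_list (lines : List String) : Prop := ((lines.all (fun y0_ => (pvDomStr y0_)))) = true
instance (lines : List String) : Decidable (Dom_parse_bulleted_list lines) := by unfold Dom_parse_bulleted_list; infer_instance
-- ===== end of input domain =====

-- B replaces A's pending-item accumulator pass by a chunking scan (strip all, then per bullet
-- slice the block up to the next bullet); same O(n) cost, different decomposition.


-- ===== PORT A =====
-- flush: `if current_item: result[current_item] = ' '.join(current_content)` (None and "" are falsy)
def pvFlushA (res : PySem.Dict String String) (item : Option String) (content : List String) :
    PySem.Dict String String :=
  match item with
  | some k => if k ≠ "" then PySem.Dict.insert res k (PySem.Str.join " " content) else res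
  | none => res

-- the for-loop of A over the lines, state = (result, current_item, current_content)
def pvLoopA : PySem.Dict String String → Option String → List String → List String →
    PySem.Dict String String
  | res, item, content, [] => pvFlushA res item content
  | res, item, content, l :: rest =>
    let s := PySem.Str.strip l
    if PySem.Str.startswith s "*" then
      pvLoopA (pvFlushA res item content)
        (some (PySem.Str.strip (PySem.Str.slice s (some 1) none))) [] rest
    else if item.getD "" != "" then
      pvLoopA res item (content ++ [s]) rest
    else
      pvLoopA res item content rest

def parse_bulleted_list (lines : List String) : List (String × String) :=
  (pvLoopA PySem.Dict.empty none [] lines).items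

-- ===== PORT B =====
def pvNotBullet (s : String) : Bool := !(PySem.Str.startswith s "*")

-- the outer while-loop of B over the (already stripped) lines; the inner scan to the next
-- bullet is the takeWhile/dropWhile split
def pvLoopB : PySem.Dict String String → List String → PySem.Dict String String
  | res, [] => res
  | res, s :: rest =>
    if PySem.Str.startswith s "*" then
      let key := PySem.Str.strip (PySem.Str.slice s (some 1) none)
      let content := rest.takeWhile pvNotBullet
      let rest' := rest.dropWhile pvNotBullet
      pvLoopB (if key ≠ "" then PySem.Dict.insert res key (PySem.Str.join " " content) else res)
        rest'
    else
      pvLoopB res rest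
  termination_by _ l => l.length
  decreasing_by
  · exact Nat.lt_succ_of_le (List.length_dropWhile_le _ _)
  · exact Nat.lt_succ_self _

def parse_bulleted_list_alt (lines : List String) : List (String × String) :=
  (pvLoopB PySem.Dict.empty (lines.map PySem.Str.strip)).items

-- ===== PRECONDITION & SPEC =====
def Spec_parse_bulleted_list (lines : List String) (out : List (String × String)) : Prop := out = parse_bulleted_list_alt lines
instance (lines : List String) (out : List (String × String)) : Decidable (Spec_parse_bulleted_list lines out) := by unfold Spec_parse_bulleted_list; infer_instance

-- ===== CLAIM (what is proved, stated in full; the proofs are below) =====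
def Claim_equal_parse_bulleted_list : Prop := ∀ (lines : List String), Dom_parse_bulleted_list lines → Spec_parse_bulleted_list lines (parse_bulleted_list lines)

-- ===== LEMMAS AND PROOFS =====

-- one-step unfoldings of B's loop
lemma pvLoopB_cons_bullet (res : PySem.Dict String String) (s : String) (rest : List String)
    (hb : PySem.Str.startswith s "*" = true) :
    pvLoopB res (s :: rest) =
      pvLoopB
        (if PySem.Str.strip (PySem.Str.slice s (some 1) none) ≠ "" then
          PySem.Dict.insert res (PySem.Str.strip (PySem.Str.slice s (some 1) none))
            (PySem.Str.join " " (rest.takeWhile pvNotBullet))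
        else res)
        (rest.dropWhile pvNotBullet) := by
  have hb' : PySem.Chars.startswith s.toList ['*'] = true := by simpa using hb
  rw [pvLoopB]; simp [hb']

lemma pvLoopB_cons_skip (res : PySem.Dict String String) (s : String) (rest : List String)
    (hb : PySem.Str.startswith s "*" = false) :
    pvLoopB res (s :: rest) = pvLoopB res rest := by
  have hb' : PySem.Chars.startswith s.toList ['*'] = false := by simpa using hb
  rw [pvLoopB]; simp [hb']

-- A's loop with a pending bullet key k equals B's loop after flushing k with the whole
-- contiguous block of (stripped) non-bullet lines that follows.
lemma loopA_bullet (rest : List String) : ∀ (res : PySem.Dict String String) (k : String)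
    (content : List String),
    pvLoopA res (some k) content rest =
      pvLoopB
        (if k ≠ "" then
          PySem.Dict.insert res k
            (PySem.Str.join " " (content ++ (rest.map PySem.Str.strip).takeWhile pvNotBullet))
        else res)
        ((rest.map PySem.Str.strip).dropWhile pvNotBullet) := by
  induction rest with
  | nil =>
    intro res k content
    by_cases hk : k = "" <;> simp [pvLoopA, pvFlushA, pvLoopB, hk]
  | cons l rs ih =>
    intro res k content
    by_cases hb : PySem.Str.startswith (PySem.Str.strip l) "*"
    · have hb' : PySem.Chars.startswith (PySem.Chars.strip l.toList) ['*'] = true := by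
        simpa using hb
      have hnb : pvNotBullet (PySem.Str.strip l) = false := by simp [pvNotBullet, hb']
      rw [pvLoopA]
      simp only [hb, if_true]
      rw [ih]
      simp only [List.map_cons, List.takeWhile_cons, List.dropWhile_cons, hnb,
        Bool.false_eq_true, if_false]
      rw [pvLoopB_cons_bullet _ _ _ hb]
      simp [pvFlushA]
    · have hb0 : PySem.Str.startswith (PySem.Str.strip l) "*" = false := by
        simpa using hb
      have hb' : PySem.Chars.startswith (PySem.Chars.strip l.toList) ['*'] = false := by
        simpa using hb0
      have hnb : pvNotBullet (PySem.Str.strip l) = true := by simp [pvNotBullet, hb']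
      rw [pvLoopA]
      simp only [hb0, Bool.false_eq_true, if_false]
      rw [List.map_cons, List.takeWhile_cons, List.dropWhile_cons, hnb]
      by_cases hk : k = ""
      · subst hk
        simp only [Option.getD_some, bne_self_eq_false, Bool.false_eq_true, if_false]
        simpa using ih res "" content
      · have ht : (Option.getD (some k) "" != "") = true := by simp [hk]
        simp only [ht, if_true, if_pos hk]
        rw [ih]
        simp [hk]

-- before the first bullet both loops just skip lines
lemma loopA_none (lines : List String) : ∀ (res : PySem.Dict String String),
    pvLoopA res none [] lines = pvLoopB res (lines.map PySem.Str.strip) := by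
  induction lines with
  | nil => intro res; simp [pvLoopA, pvFlushA, pvLoopB]
  | cons l rs ih =>
    intro res
    by_cases hb : PySem.Str.startswith (PySem.Str.strip l) "*"
    · rw [pvLoopA]
      simp only [hb, if_true]
      rw [loopA_bullet, List.map_cons, pvLoopB_cons_bullet _ _ _ hb]
      simp [pvFlushA]
    · have hb0 : PySem.Str.startswith (PySem.Str.strip l) "*" = false := by
        simpa using hb
      rw [pvLoopA]
      simp only [hb0, Bool.false_eq_true, if_false, Option.getD_none, bne_self_eq_false]
      rw [List.map_cons, pvLoopB_cons_skip _ _ _ hb0]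
      exact ih res

-- ===== VERDICT (by name: the statement is the Claim_ definition above) =====
theorem parse_bulleted_list_spec : Claim_equal_parse_bulleted_list := by
  intro lines _
  unfold Spec_parse_bulleted_list parse_bulleted_list parse_bulleted_list_alt
  rw [loopA_none]
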